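-- pv_equiv track=rewrite | github.com/jacobmentalconstruct/_nGraphMANIFOLD | src/core/transformation/intake.py | markdown_heading_text
-- ===== SOURCE A (Python) =====
-- def markdown_heading_text(line: str) -> str:
--     """Return Markdown heading text for simple ATX headings."""
--     stripped = line.strip()
--     if not stripped.startswith("#"):
--         return ""
--     marker, _, title = stripped.partition(" ")
--     if not marker or any(char != "#" for char in marker) or not title.strip():
--         return ""
--     return title.strip()
-- ===== SOURCE B (Python) =====
-- def markdown_heading_text(line: str) -> str:
--     """Return Markdown heading text for simple ATX headings."""
--     s = line.strip()
--     i = 0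
--     while i < len(s) and s[i] == '#':
--         i += 1
--     if i == 0 or i >= len(s) or s[i] != ' ':
--         return ''
--     return s[i + 1:].strip()
-- ===== Notes on version B (the rewrite author's own statement) =====
-- stated objective: simpler
-- what changed: B replaces the partition-at-first-space plus all-'#' validation plus non-empty-title guard with a single scan that counts leading '#'s and checks the next character is a space, returning the stripped remainder directly (empty title needs no guard since '' is returned anyway).
import Mathlib
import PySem

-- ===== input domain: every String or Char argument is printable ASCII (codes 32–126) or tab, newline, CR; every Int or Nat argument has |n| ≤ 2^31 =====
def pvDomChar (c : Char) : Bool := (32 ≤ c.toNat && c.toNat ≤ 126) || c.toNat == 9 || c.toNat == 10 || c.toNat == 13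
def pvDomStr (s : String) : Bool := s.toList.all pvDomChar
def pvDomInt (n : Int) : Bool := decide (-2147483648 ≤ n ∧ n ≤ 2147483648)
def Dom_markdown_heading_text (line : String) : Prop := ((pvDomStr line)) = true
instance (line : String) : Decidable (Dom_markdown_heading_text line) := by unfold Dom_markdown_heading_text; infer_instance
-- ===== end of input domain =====

-- B is simpler: one scan over leading '#'s plus a space check replaces A's partition + all-'#' validation + non-empty-title guard; same return value everywhere.

-- ===== PORT A =====
-- str.partition(" ") restricted to what A uses: (before-first-space, after-first-space); ([s], []) when no space (exact: title is '' then)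
def pvPartSpace (cs : List Char) : List Char × List Char :=
  match cs with
  | [] => ([], [])
  | c :: t => if c = ' ' then ([], t) else
      let p := pvPartSpace t
      (c :: p.1, p.2)

def markdown_heading_text (line : String) : String :=
  let stripped := PySem.Chars.strip line.toList
  if ¬ (PySem.Chars.startswith stripped ['#'] = true) then "" else
  let p := pvPartSpace stripped
  let marker := p.1
  let title := p.2
  if marker = [] ∨ marker.any (fun c => c ≠ '#') ∨ PySem.Chars.strip title = [] then ""
  else String.mk (PySem.Chars.strip title)

-- ===== PORT B =====
def markdown_heading_text_alt (line : String) : String :=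
  let s := PySem.Chars.strip line.toList
  -- the while loop counting leading '#'s: hashes = s[:i], rest = s[i:]
  let hashes := s.takeWhile (fun c => c = '#')
  let rest := s.dropWhile (fun c => c = '#')
  match rest with
  | ' ' :: r => if hashes = [] then "" else String.mk (PySem.Chars.strip r)
  | _ => ""

-- ===== PRECONDITION & SPEC =====
def Spec_markdown_heading_text (line : String) (out : String) : Prop := out = markdown_heading_text_alt line
instance (line : String) (out : String) : Decidable (Spec_markdown_heading_text line out) := by unfold Spec_markdown_heading_text; infer_instance

-- ===== CLAIM (what is proved, stated in full; the proofs are below) =====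
def Claim_equal_markdown_heading_text : Prop := ∀ (line : String), Dom_markdown_heading_text line → Spec_markdown_heading_text line (markdown_heading_text line)

-- ===== LEMMAS AND PROOFS =====

-- after one leading '#', A's partition-based check equals B's dropWhile-based check
theorem pv_inner (t : List Char) :
    (if (pvPartSpace t).1.any (fun c => c ≠ '#') ∨ PySem.Chars.strip (pvPartSpace t).2 = [] then ""
     else String.mk (PySem.Chars.strip (pvPartSpace t).2)) =
    (match t.dropWhile (fun c => c = '#') with
     | ' ' :: r => String.mk (PySem.Chars.strip r)
     | _ => "") := by
  induction t with
  | nil => simp [pvPartSpace, show PySem.Chars.strip ([] : List Char) = [] from rfl]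
  | cons c u ih =>
    by_cases hc : c = '#'
    · subst hc
      simpa [pvPartSpace, List.dropWhile] using ih
    · by_cases hs : c = ' '
      · subst hs
        simp [pvPartSpace, List.dropWhile]
        by_cases he : PySem.Chars.strip u = []
        · simp [he]; rfl
        · simp [he]
      · simp [pvPartSpace, List.dropWhile, hc, hs]

theorem pv_main (s : List Char) :
    (if ¬ (PySem.Chars.startswith s ['#'] = true) then "" else
      let p := pvPartSpace s
      if p.1 = [] ∨ p.1.any (fun c => c ≠ '#') ∨ PySem.Chars.strip p.2 = [] then ""
      else String.mk (PySem.Chars.strip p.2)) =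
    (match s.dropWhile (fun c => c = '#') with
     | ' ' :: r => if s.takeWhile (fun c => c = '#') = [] then "" else String.mk (PySem.Chars.strip r)
     | _ => "") := by
  cases s with
  | nil => simp [PySem.Chars.startswith]
  | cons c t =>
    by_cases hc : c = '#'
    · subst hc
      have hsw : PySem.Chars.startswith ('#' :: t) ['#'] = true := by
        rw [PySem.Chars.startswith_iff]; exact ⟨t, rfl⟩
      have h := pv_inner t
      simp only [hsw, not_true, if_false, pvPartSpace, List.takeWhile, List.dropWhile,
        decide_true] at *
      cases hdw : t.dropWhile (fun c => c = '#') with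
      | nil => simp [hdw] at h ⊢; simpa [pvPartSpace] using h
      | cons d r =>
        by_cases hd : d = ' '
        · subst hd
          simp [hdw] at h ⊢
          simpa using h
        · simp [hdw, hd] at h ⊢
          simpa using h
    · have hsw : PySem.Chars.startswith (c :: t) ['#'] = false := by
        rw [Bool.eq_false_iff]
        intro hcontra
        rw [PySem.Chars.startswith_iff] at hcontra
        obtain ⟨u, hu⟩ := hcontra
        exact hc (by injection hu with h1 _; exact h1.symm)
      simp only [hsw]
      simp [List.dropWhile, List.takeWhile, hc]
      split <;> rfl

-- ===== VERDICT (by name: the statement is the Claim_ definition above) =====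
theorem markdown_heading_text_spec : Claim_equal_markdown_heading_text := by
  intro line _
  unfold Spec_markdown_heading_text markdown_heading_text markdown_heading_text_alt
  exact pv_main (PySem.Chars.strip line.toList)
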